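-- pv_equiv track=rewrite | github.com/ooshyun/Analyze-GoogleSheet | src/util.py | _convert_info_to_list
-- ===== SOURCE A (Python) =====
-- from typing import (
--     List,
--     Dict,
--     Tuple,
-- )
--
-- ANSWER_EMPTY_LEN = 0
--
-- def _convert_info_to_list(key_list: list, value_list: list) -> List[dict]:
--     data_list = []
--     key_loc = 0
--     for id_key in range(len(key_list)):
--         # update the index of key
--         if len(key_list[id_key]) > ANSWER_EMPTY_LEN:
--             key_loc = id_key
--
--         key = key_list[key_loc]
--         for id_val, values in enumerate(value_list):
--             val = values[id_key]
--             if len(data_list) - 1 < id_val: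
--                 data_list.append({key: [val]})
--             else:
--                 if key in data_list[id_val].keys():
--                     data_list[id_val][key].append(val)
--                 else:
--                     data_list[id_val][key] = [val]
--     return data_list
-- ===== SOURCE B (Python) =====
-- def _convert_info_to_list(key_list: list, value_list: list):
--     # Resolve the effective key of every column once (carry-forward rule),
--     # then build the output row by row.
--     resolved = []
--     key_loc = 0
--     for id_key, key in enumerate(key_list):
--         if len(key) > 0:
--             key_loc = id_key
--         resolved.append(key_list[key_loc])
--
--     data_list = []
--     for values in value_list:
--         row = {}
--         for id_key, key in enumerate(resolved):
--             val = values[id_key]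
--             if key in row:
--                 row[key].append(val)
--             else:
--                 row[key] = [val]
--         data_list.append(row)
--     return data_list
-- ===== Notes on version B (the rewrite author's own statement) =====
-- stated objective: simpler
-- what changed: B resolves the effective key of every column in one preliminary pass and then builds each output row dict in a single row-major pass, instead of A's column-major sweep that bootstraps and re-updates every row dict once per column.
-- outside the precondition, e.g. on _convert_info_to_list([], [['x']]): A returns [], B returns [{}]
import Mathlib
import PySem

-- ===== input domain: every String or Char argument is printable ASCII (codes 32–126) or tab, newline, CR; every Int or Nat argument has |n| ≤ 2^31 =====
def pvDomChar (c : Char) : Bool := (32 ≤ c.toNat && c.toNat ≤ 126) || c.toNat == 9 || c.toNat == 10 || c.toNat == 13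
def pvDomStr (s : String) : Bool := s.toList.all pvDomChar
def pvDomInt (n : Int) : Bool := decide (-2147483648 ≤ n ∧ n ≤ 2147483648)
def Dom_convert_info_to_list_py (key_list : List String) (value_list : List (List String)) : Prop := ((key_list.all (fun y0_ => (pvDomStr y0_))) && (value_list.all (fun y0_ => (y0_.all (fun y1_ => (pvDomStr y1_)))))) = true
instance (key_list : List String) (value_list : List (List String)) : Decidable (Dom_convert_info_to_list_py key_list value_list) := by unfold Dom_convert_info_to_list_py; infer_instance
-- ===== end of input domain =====

-- B is a simpler decomposition of the same pivot: resolve the effective key of every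
-- column once, then build each output row in a single row-major pass (A walks
-- column-major, bootstrapping/updating every row dict per column). Equal return value
-- on Pre_; no argument is mutated by either version.

-- shared helper: the dict-accumulate step `row[key].append(val) if key in row else row[key]=[val]`
-- (both Pythons contain this identical dict operation), on an insertion-ordered assoc list
def pvDictAdd (row : List (String × List String)) (key : String) (val : String) : List (String × List String) :=
  if row.any (fun p => p.1 == key) then
    row.map (fun p => if p.1 == key then (p.1, p.2 ++ [val]) else p)
  else
    row ++ [(key, [val])]

-- ===== PORT A =====
-- inner loop of A: `for id_val, values in enumerate(value_list): …`
def pvInnerStep (key : String) (id_key : Int) (data : List (List (String × List String)))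
    (p : Int × List String) : List (List (String × List String)) :=
  let val := PySem.List.pyGetD p.2 id_key ""   -- values[id_key]; total under Pre_ (row long enough)
  if (data.length : Int) - 1 < p.1 then
    data ++ [[(key, [val])]]
  else
    PySem.List.pySetD data p.1 (pvDictAdd (PySem.List.pyGetD data p.1 []) key val)

-- outer loop body of A: carried state is (data_list, key_loc)
def pvOuterStep (key_list : List String) (value_list : List (List String))
    (st : List (List (String × List String)) × Int) (id_key : Int) :
    List (List (String × List String)) × Int :=
  let key_loc : Int := if 0 < PySem.Str.len (PySem.List.pyGetD key_list id_key "") then id_key else st.2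
  let key := PySem.List.pyGetD key_list key_loc ""
  ((PySem.List.enumerate value_list).foldl (pvInnerStep key id_key) st.1, key_loc)

def convert_info_to_list_py (key_list : List String) (value_list : List (List String)) :
    List (List (String × List String)) :=
  ((PySem.List.pyRange 0 (key_list.length : Int) 1).foldl (pvOuterStep key_list value_list)
    (([] : List (List (String × List String))), (0 : Int))).1

-- ===== PORT B =====
-- first pass of B: `resolved.append(key_list[key_loc])` under the carry-forward rule
def pvResolveStep (key_list : List String) (st : List String × Int) (p : Int × String) :
    List String × Int :=
  let key_loc : Int := if 0 < PySem.Str.len p.2 then p.1 else st.2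
  (st.1 ++ [PySem.List.pyGetD key_list key_loc ""], key_loc)

def pvResolvedKeys (key_list : List String) : List String :=
  ((PySem.List.enumerate key_list).foldl (pvResolveStep key_list) (([] : List String), (0 : Int))).1

-- one row of B: `for id_key, key in enumerate(resolved): …` accumulating into an empty dict
def pvBuildRow (resolved : List String) (values : List String) : List (String × List String) :=
  (PySem.List.enumerate resolved).foldl
    (fun row p => pvDictAdd row p.2 (PySem.List.pyGetD values p.1 "")) []

def convert_info_to_list_py_alt (key_list : List String) (value_list : List (List String)) :
    List (List (String × List String)) :=
  let resolved := pvResolvedKeys key_list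
  value_list.foldl (fun data values => data ++ [pvBuildRow resolved values]) []

-- ===== PRECONDITION & SPEC =====
-- Pre_ excludes (1) inputs with a row shorter than key_list, where both Pythons raise
-- IndexError, and (2) the degenerate corner key_list = [] with value_list ≠ [], where A
-- returns [] but B returns one empty dict per row — both values are defensible for a
-- grid with no key columns and neither is specified.
def Pre_convert_info_to_list_py (key_list : List String) (value_list : List (List String)) : Prop :=
  (value_list = [] ∨ key_list ≠ []) ∧ ∀ row ∈ value_list, key_list.length ≤ row.length
instance (key_list : List String) (value_list : List (List String)) : Decidable (Pre_convert_info_to_list_py key_list value_list) := by unfold Pre_convert_info_to_list_py; infer_instance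

def pvWitness_convert_info_to_list_py : List String × List (List String) :=
  (["a", ""], [["x", "y"], ["u", "v"]])

def Spec_convert_info_to_list_py (key_list : List String) (value_list : List (List String)) (out : List (List (String × List String))) : Prop := out = convert_info_to_list_py_alt key_list value_list
instance (key_list : List String) (value_list : List (List String)) (out : List (List (String × List String))) : Decidable (Spec_convert_info_to_list_py key_list value_list out) := by unfold Spec_convert_info_to_list_py; infer_instance

-- ===== CLAIM (what is proved, stated in full; the proofs are below) =====
def Claim_equal_convert_info_to_list_py : Prop := ∀ (key_list : List String) (value_list : List (List String)), Dom_convert_info_to_list_py key_list value_list → Pre_convert_info_to_list_py key_list value_list → Spec_convert_info_to_list_py key_list value_list (convert_info_to_list_py key_list value_list)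

-- ===== LEMMAS AND PROOFS =====

theorem pv_enumerate_nil {α : Type} (s : Int) :
    PySem.List.enumerate ([] : List α) s = [] := rfl

theorem pv_buildRow_single (key : String) (v : List String) :
    pvBuildRow [key] v = [(key, [PySem.List.pyGetD v 0 ""])] := by
  simp [pvBuildRow, PySem.List.enumerate_cons, pvDictAdd]

-- enumerate of a snoc
theorem pv_enumerate_append {α : Type} (xs : List α) (x : α) (s : Int) :
    PySem.List.enumerate (xs ++ [x]) s
      = PySem.List.enumerate xs s ++ [(s + xs.length, x)] := by
  induction xs generalizing s with
  | nil => simp [PySem.List.enumerate_cons]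
  | cons y ys ih =>
      simp only [List.cons_append, PySem.List.enumerate_cons, ih, List.length_cons]
      simp; ring_nf

-- zip of a mapped copy with the original
theorem pv_zip_map_self {α β γ : Type} (f : α → β) (g : β × α → γ) (l : List α) :
    ((l.map f).zip l).map g = l.map (fun v => g (f v, v)) := by
  induction l with
  | nil => rfl
  | cons x xs ih => simp [ih]

-- A's inner loop in the bootstrap regime: data_list currently ends exactly where the
-- enumeration starts, so every step appends a fresh singleton dict
theorem pv_inner_app (key : String) (c : Int) :
    ∀ (vs : List (List String)) (P : List (List (String × List String))),
    (PySem.List.enumerate vs (P.length : Int)).foldl (pvInnerStep key c) P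
      = P ++ vs.map (fun values => [(key, [PySem.List.pyGetD values c ""])]) := by
  intro vs
  induction vs with
  | nil => intro P; simp
  | cons v vs ih =>
      intro P
      rw [PySem.List.enumerate_cons, List.foldl_cons]
      have hstep : pvInnerStep key c P ((P.length : Int), v)
          = P ++ [[(key, [PySem.List.pyGetD v c ""])]] := by
        simp only [pvInnerStep]
        rw [if_pos (by omega)]
      rw [hstep]
      have hl : ((P.length : Int) + 1) = (((P ++ [[(key, [PySem.List.pyGetD v c ""])]]).length : Int)) := by
        simp
      rw [hl, ih]
      simp

-- A's inner loop in the update regime: data_list already holds one dict per row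
theorem pv_inner_upd (key : String) (c : Int) :
    ∀ (vs : List (List String)) (P D : List (List (String × List String))),
    D.length = vs.length →
    (PySem.List.enumerate vs (P.length : Int)).foldl (pvInnerStep key c) (P ++ D)
      = P ++ (D.zip vs).map
          (fun q => pvDictAdd q.1 key (PySem.List.pyGetD q.2 c "")) := by
  intro vs
  induction vs with
  | nil => intro P D h; simp at h; simp [h]
  | cons v vs ih =>
      intro P D h
      match D with
      | [] => simp at h
      | d :: D' =>
        simp only [List.length_cons] at h
        rw [PySem.List.enumerate_cons, List.foldl_cons]
        have hstep : pvInnerStep key c (P ++ d :: D') ((P.length : Int), v)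
            = (P ++ [pvDictAdd d key (PySem.List.pyGetD v c "")]) ++ D' := by
          simp only [pvInnerStep]
          rw [if_neg (by simp)]
          have hget : PySem.List.pyGetD (P ++ d :: D') ((P.length : Int)) [] = d := by
            rw [PySem.List.pyGetD_natCast]
            simp [List.getD]
          rw [hget, PySem.List.pySetD_natCast]
          simp
        rw [hstep]
        have hl : ((P.length : Int) + 1)
            = (((P ++ [pvDictAdd d key (PySem.List.pyGetD v c "")]).length : Int)) := by simp
        rw [hl, ih _ _ (by omega)]
        simp

-- one more resolved column extends every row by one dict-accumulate step
theorem pv_buildRow_snoc (acc : List String) (key : String) (v : List String) :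
    pvBuildRow (acc ++ [key]) v
      = pvDictAdd (pvBuildRow acc v) key (PySem.List.pyGetD v (acc.length : Int) "") := by
  simp only [pvBuildRow]
  rw [pv_enumerate_append, List.foldl_append]
  simp

-- main invariant: walking the remaining columns, A's (data_list, key_loc) stays in sync
-- with B's (resolved, key_loc)
theorem pv_main (key_list : List String) (value_list : List (List String)) :
    ∀ (rest : List String) (a : Nat) (acc : List String) (loc : Int)
      (data : List (List (String × List String))),
    key_list.drop a = rest → acc.length = a →
    ((acc = [] ∧ data = []) ∨ data = value_list.map (pvBuildRow acc)) →
    (((PySem.List.pyRange (a : Int) (key_list.length : Int) 1).foldl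
        (pvOuterStep key_list value_list) (data, loc)).2
      = ((PySem.List.enumerate rest (a : Int)).foldl (pvResolveStep key_list) (acc, loc)).2)
    ∧ ((PySem.List.enumerate rest (a : Int)).foldl (pvResolveStep key_list) (acc, loc)).1.length
        = acc.length + rest.length
    ∧ ((((PySem.List.pyRange (a : Int) (key_list.length : Int) 1).foldl
          (pvOuterStep key_list value_list) (data, loc)).1 = []
        ∧ ((PySem.List.enumerate rest (a : Int)).foldl (pvResolveStep key_list) (acc, loc)).1 = [])
      ∨ ((PySem.List.pyRange (a : Int) (key_list.length : Int) 1).foldl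
          (pvOuterStep key_list value_list) (data, loc)).1
        = value_list.map (pvBuildRow
            (((PySem.List.enumerate rest (a : Int)).foldl (pvResolveStep key_list) (acc, loc)).1))) := by
  intro rest
  induction rest with
  | nil =>
      intro a acc loc data hdrop hlen hinv
      have ha : key_list.length ≤ a := by
        by_contra hcon
        have := List.drop_eq_nil_iff.mp hdrop
        omega
      rw [PySem.List.pyRange_one_eq_nil (by exact_mod_cast ha), pv_enumerate_nil]
      simp only [List.foldl_nil]
      refine ⟨by trivial, by simp, ?_⟩
      rcases hinv with ⟨h1, h2⟩ | h
      · exact Or.inl ⟨h2, h1⟩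
      · exact Or.inr h
  | cons x rest ih =>
      intro a acc loc data hdrop hlen hinv
      have ha : a < key_list.length := by
        by_contra hcon
        rw [List.drop_eq_nil_iff.mpr (by omega)] at hdrop
        exact List.cons_ne_nil x rest hdrop.symm
      have hget : PySem.List.pyGetD key_list (a : Int) "" = x := by
        rw [PySem.List.pyGetD_natCast]
        have : key_list[a]? = some x := by
          have h0 : (key_list.drop a)[0]? = some x := by rw [hdrop]; rfl
          rwa [List.getElem?_drop, Nat.add_zero] at h0
        simp [List.getD, this]
      rw [PySem.List.pyRange_one_cons (by exact_mod_cast ha), List.foldl_cons,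
          PySem.List.enumerate_cons, List.foldl_cons]
      -- the two sides compute the same new key_loc and key
      set loc' : Int := if 0 < PySem.Str.len x then (a : Int) else loc with hloc'
      have hA : pvOuterStep key_list value_list (data, loc) (a : Int)
          = ((PySem.List.enumerate value_list).foldl
              (pvInnerStep (PySem.List.pyGetD key_list loc' "") (a : Int)) data, loc') := by
        simp only [pvOuterStep, hget]
        rfl
      have hB : pvResolveStep key_list (acc, loc) ((a : Int), x)
          = (acc ++ [PySem.List.pyGetD key_list loc' ""], loc') := by
        simp only [pvResolveStep]
        rfl
      set key := PySem.List.pyGetD key_list loc' "" with hkey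
      -- new A data after this column
      have hdata : (PySem.List.enumerate value_list).foldl (pvInnerStep key (a : Int)) data
          = value_list.map (pvBuildRow (acc ++ [key])) := by
        rcases hinv with ⟨hacc, hdata0⟩ | hmap
        · subst hdata0
          subst hacc
          simp only [List.length_nil] at hlen
          rw [show (PySem.List.enumerate value_list : List (Int × List String))
                = PySem.List.enumerate value_list
                  ((([] : List (List (String × List String))).length : Int)) from rfl,
            pv_inner_app]
          simp only [List.nil_append]
          apply List.map_congr_left
          intro v _
          rw [pv_buildRow_single]
          have ha0 : (a : Int) = 0 := by omega
          rw [ha0]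
        · subst hmap
          have hlenD : (value_list.map (pvBuildRow acc)).length = value_list.length := by simp
          have := pv_inner_upd key (a : Int) value_list
            ([] : List (List (String × List String))) (value_list.map (pvBuildRow acc)) hlenD
          simp only [List.length_nil, Nat.cast_zero, List.nil_append] at this
          rw [this, pv_zip_map_self]
          apply List.map_congr_left
          intro v _
          rw [pv_buildRow_snoc, hlen]
      rw [hA, hB]
      have hrec := ih (a + 1) (acc ++ [key]) loc'
        (value_list.map (pvBuildRow (acc ++ [key])))
        (by rw [← List.drop_drop, hdrop]; rfl)
        (by simp [hlen])
        (Or.inr rfl)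
      have hcast : ((a : Int) + 1) = (((a + 1 : Nat)) : Int) := by push_cast; ring
      rw [hcast] at *
      rw [hdata]
      refine ⟨hrec.1, ?_, hrec.2.2⟩
      rw [hrec.2.1]
      simp
      omega

-- ===== VERDICT (by name: the statement is the Claim_ definition above) =====
theorem convert_info_to_list_py_spec : Claim_equal_convert_info_to_list_py := by
  intro key_list value_list _hdom hpre
  unfold Spec_convert_info_to_list_py
  unfold convert_info_to_list_py convert_info_to_list_py_alt pvResolvedKeys
  rw [PySem.List.foldl_append_singleton_eq_map]
  have hmain := pv_main key_list value_list key_list 0 [] 0 [] (by simp) (by simp)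
    (Or.inl ⟨rfl, rfl⟩)
  simp only [Nat.cast_zero, List.length_nil, Nat.zero_add] at hmain
  rcases hmain.2.2 with ⟨hA, hr⟩ | hmap
  · -- resolved is empty, so key_list = [] and (by Pre_) value_list = []
    have hlen0 : ([] : List String).length = key_list.length := by
      rw [← hr]; exact hmain.2.1
    have hkl : key_list = [] := List.length_eq_zero_iff.mp (by simpa using hlen0.symm)
    rcases hpre.1 with hvl | hne
    · rw [hA, hvl]; simp
    · exact absurd hkl hne
  · rw [hmap]
    simp
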